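-- pv_equiv track=rewrite | github.com/jesopo/scpl | scpl/common.py | find_unused_delimiter
-- ===== SOURCE A (Python) =====
-- from typing      import Iterator, List, Optional, Sequence
--
-- def find_unescaped(
--         s: str,
--         c: str
--         ) -> Iterator[int]:
--
--     i = 0
--
--     while i < len(s):
--         c2 = s[i]
--         if c2 == "\\":
--             i += 1
--         elif c2 == c:
--             yield i
--         i += 1
--
-- def find_unused_delimiter(
--         s:     str,
--         chars: Sequence[str]
--         ) -> Optional[str]:
--
--     for char in chars:
--         try:
--             next(find_unescaped(s, char))
--         except StopIteration:
--             return char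
--     else:
--         return None
-- ===== SOURCE B (Python) =====
-- def find_unused_delimiter(s, chars):
--     # one pass: collect every character that occurs unescaped in s
--     unescaped = set()
--     skip = False
--     for c in s:
--         if skip:
--             skip = False
--         elif c == "\\":
--             skip = True
--         else:
--             unescaped.add(c)
--     for char in chars:
--         if char not in unescaped:
--             return char
--     return None
-- ===== Notes on version B (the rewrite author's own statement) =====
-- stated objective: alternative
-- what changed: B replaces A's per-candidate generator rescan of s (a fresh index-walking state machine for every char in chars) with a single flag-based pass over s that builds the set of unescaped characters, followed by membership tests; measured speed gain was inconsistent across inputs, so no speed is claimed.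
import Mathlib
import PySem

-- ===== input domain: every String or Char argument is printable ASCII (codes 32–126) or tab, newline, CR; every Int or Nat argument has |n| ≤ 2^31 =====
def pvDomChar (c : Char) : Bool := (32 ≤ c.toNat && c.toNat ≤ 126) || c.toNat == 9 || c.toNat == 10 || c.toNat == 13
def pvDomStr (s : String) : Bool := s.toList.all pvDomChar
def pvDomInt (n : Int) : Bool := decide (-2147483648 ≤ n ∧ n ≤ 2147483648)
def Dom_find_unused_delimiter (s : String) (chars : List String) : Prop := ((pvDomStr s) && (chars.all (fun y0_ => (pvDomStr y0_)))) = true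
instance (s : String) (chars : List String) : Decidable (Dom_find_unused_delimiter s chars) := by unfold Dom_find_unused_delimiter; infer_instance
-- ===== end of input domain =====

-- B builds the set of unescaped characters in one pass over s (instead of A's
-- per-candidate generator rescan of s), then scans chars for the first absentee.

-- ===== PORT A =====
-- find_unescaped's while loop, specialised to 'does next(...) succeed': walks s by
-- index, a backslash skips the following char, an unescaped char equal to c yields.
def aHasUnescaped (l : List Char) (c : String) : Bool :=
  match l with
  | [] => false
  | c2 :: rest =>
    if String.ofList [c2] = "\\" then aHasUnescaped (rest.drop 1) c
    else if String.ofList [c2] = c then true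
    else aHasUnescaped rest c
termination_by l.length
decreasing_by
  all_goals simp

def find_unused_delimiter (s : String) (chars : List String) : Option String :=
  match chars with
  | [] => none
  | ch :: rest =>
    if aHasUnescaped s.toList ch then find_unused_delimiter s rest else some ch

-- ===== PORT B =====
-- the first for-loop of Source B: flag-based pass collecting unescaped chars into a set
def bCollect (l : List Char) (skip : Bool) (acc : PySem.Set String) : PySem.Set String :=
  match l with
  | [] => acc
  | c :: rest =>
    if skip then bCollect rest false acc
    else if c = '\\' then bCollect rest true acc
    else bCollect rest false (PySem.Set.add acc (String.ofList [c]))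

def find_unused_delimiter_alt (s : String) (chars : List String) : Option String :=
  let unescaped := bCollect s.toList false PySem.Set.empty
  chars.find? (fun ch => !(PySem.Set.contains unescaped ch))

-- ===== PRECONDITION & SPEC =====
def Spec_find_unused_delimiter (s : String) (chars : List String) (out : Option String) : Prop := out = find_unused_delimiter_alt s chars
instance (s : String) (chars : List String) (out : Option String) : Decidable (Spec_find_unused_delimiter s chars out) := by unfold Spec_find_unused_delimiter; infer_instance

-- ===== CLAIM (what is proved, stated in full; the proofs are below) =====
def Claim_equal_find_unused_delimiter : Prop := ∀ (s : String) (chars : List String), Dom_find_unused_delimiter s chars → Spec_find_unused_delimiter s chars (find_unused_delimiter s chars)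

-- ===== LEMMAS AND PROOFS =====

theorem backslash_lit : "\\" = String.ofList ['\\'] := rfl

-- membership in bCollect's accumulator-threaded result
theorem mem_bCollect (l : List Char) (skip : Bool) (acc : PySem.Set String) (x : String) :
    x ∈ bCollect l skip acc ↔ x ∈ acc ∨ x ∈ bCollect l skip PySem.Set.empty := by
  induction l generalizing skip acc with
  | nil => simp [bCollect, PySem.Set.empty]
  | cons c rest ih =>
    cases skip with
    | true =>
      rw [show ∀ a, bCollect (c :: rest) true a = bCollect rest false a from fun _ => rfl,
          show ∀ a, bCollect (c :: rest) true a = bCollect rest false a from fun _ => rfl]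
      exact ih false acc
    | false =>
      by_cases hc : c = '\\'
      · rw [show ∀ a, bCollect (c :: rest) false a = bCollect rest true a from
              fun _ => by simp [bCollect, hc]]
        rw [show bCollect (c :: rest) false PySem.Set.empty = bCollect rest true PySem.Set.empty from
              by simp [bCollect, hc]]
        exact ih true acc
      · rw [show ∀ a, bCollect (c :: rest) false a = bCollect rest false (PySem.Set.add a (String.ofList [c])) from
              fun _ => by simp [bCollect, hc]]
        rw [show bCollect (c :: rest) false PySem.Set.empty = bCollect rest false (PySem.Set.add PySem.Set.empty (String.ofList [c])) from
              by simp [bCollect, hc]]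
        rw [ih false (PySem.Set.add acc (String.ofList [c])),
            ih false (PySem.Set.add PySem.Set.empty (String.ofList [c])),
            ih false (PySem.Set.empty)]
        simp [PySem.Set.mem_add, PySem.Set.empty]
        tauto

-- A's generator test agrees with membership in B's collected set
theorem aHas_eq_mem (l : List Char) (c : String) :
    aHasUnescaped l c = true ↔ c ∈ bCollect l false PySem.Set.empty := by
  induction l using aHasUnescaped.induct c with
  | case1 => simp [aHasUnescaped, bCollect, PySem.Set.empty]
  | case2 c2 rest hb ih =>
    have hc2 : c2 = '\\' := by
      rw [backslash_lit, String.ofList_inj] at hb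
      simpa using hb
    rw [show aHasUnescaped (c2 :: rest) c = aHasUnescaped (rest.drop 1) c from
          by rw [aHasUnescaped, if_pos hb]]
    rw [show bCollect (c2 :: rest) false PySem.Set.empty = bCollect rest true PySem.Set.empty from
          by simp [bCollect, hc2]]
    rcases rest with _ | ⟨d, rest'⟩
    · simpa using ih
    · rw [show bCollect (d :: rest') true PySem.Set.empty = bCollect rest' false PySem.Set.empty from rfl]
      simpa using ih
  | case3 c2 rest hb he =>
    have hc2 : c2 ≠ '\\' := by
      intro h; exact hb (by rw [h, backslash_lit])
    rw [show aHasUnescaped (c2 :: rest) c = true from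
          by rw [aHasUnescaped, if_neg hb, if_pos he]]
    rw [show bCollect (c2 :: rest) false PySem.Set.empty = bCollect rest false (PySem.Set.add PySem.Set.empty (String.ofList [c2])) from
          by simp [bCollect, hc2]]
    rw [mem_bCollect]
    simp [PySem.Set.empty, he]
  | case4 c2 rest hb he ih =>
    have hc2 : c2 ≠ '\\' := by
      intro h; exact hb (by rw [h, backslash_lit])
    rw [show aHasUnescaped (c2 :: rest) c = aHasUnescaped rest c from
          by rw [aHasUnescaped, if_neg hb, if_neg he]]
    rw [show bCollect (c2 :: rest) false PySem.Set.empty = bCollect rest false (PySem.Set.add PySem.Set.empty (String.ofList [c2])) from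
          by simp [bCollect, hc2]]
    rw [mem_bCollect]
    simp only [PySem.Set.mem_add, PySem.Set.empty, List.not_mem_nil, false_or]
    constructor
    · intro h; exact Or.inr (ih.mp h)
    · rintro (h | h)
      · exact absurd h.symm he
      · exact ih.mpr h

-- ===== VERDICT (by name: the statement is the Claim_ definition above) =====
theorem find_unused_delimiter_spec : Claim_equal_find_unused_delimiter := by
  intro s chars hdom
  clear hdom
  unfold Spec_find_unused_delimiter find_unused_delimiter_alt
  induction chars with
  | nil => simp [find_unused_delimiter]
  | cons ch rest ih =>
    rw [find_unused_delimiter, List.find?]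
    have hmem : aHasUnescaped s.toList ch = PySem.Set.contains (bCollect s.toList false PySem.Set.empty) ch := by
      rcases h : aHasUnescaped s.toList ch with _ | _
      · symm
        rw [Bool.eq_false_iff]
        intro hcon
        rw [PySem.Set.contains_iff] at hcon
        rw [← aHas_eq_mem] at hcon
        simp [h] at hcon
      · symm
        rw [PySem.Set.contains_iff]
        exact (aHas_eq_mem _ _).mp h
    rw [← hmem]
    cases h : aHasUnescaped s.toList ch with
    | true => simpa using ih
    | false => simp
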